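-- pv_equiv track=rewrite | github.com/ieesejin/algorithm_study | programmers/괄호 변환.py | solution
-- ===== SOURCE A (Python) =====
-- def solution(p):
--     def split(p):
--         str1 = ''
--         str2 = ''
--         count1 = 0
--         count2 = 0
--
--         for i in range(len(p)):
--             str1 += p[i]
--             if p[i] == '(':
--                 count1 += 1
--             if p[i] == ')':
--                 count2 += 1
--
--             if count1 == count2:
--                 str2 = p[i + 1:]
--                 break
--
--         return str1, str2
--
--     def right(p):
--         result = False
--         count1 = 0
--         count2 = 0
--
--         for i in range(len(p)):
--             if p[i] == '(':
--                 count1 += 1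
--             if p[i] == ')':
--                 count2 += 1
--
--             if count2 > count1:
--                 return result
--
--         if count1 == count2:
--             result = True
--
--         return result
--
--     if len(p) == 0:
--         return ''
--
--     u, v = split(p)
--
--     if right(u):
--         return u + solution(v)
--     else:
--         answer = '('
--         answer += solution(v)
--         answer += ')'
--
--         new_u = u[1:-1]
--         for i in range(len(new_u)):
--             if new_u[i] == '(':
--                 answer += ')'
--             if new_u[i] == ')':
--                 answer += '('
--
--         return answer
-- ===== SOURCE B (Python) =====
-- def solution(p):
--     out = []
--
--     def go(lo, hi):
--         while lo < hi:
--             i = lo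
--             bal = 0
--             ok = True
--             while True:
--                 c = p[i]
--                 if c == '(':
--                     bal += 1
--                 elif c == ')':
--                     bal -= 1
--                 if bal < 0:
--                     ok = False
--                 i += 1
--                 if bal == 0 or i >= hi:
--                     break
--             if ok and bal == 0:
--                 out.append(p[lo:i])
--                 lo = i
--             else:
--                 out.append('(')
--                 go(i, hi)
--                 out.append(')')
--                 for c in p[lo + 1:i - 1]:
--                     if c == '(':
--                         out.append(')')
--                     elif c == ')':
--                         out.append('(')
--                 return
--
--     go(0, len(p))
--     return ''.join(out)
-- ===== Notes on version B (the rewrite author's own statement) =====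
-- stated objective: faster
-- what changed: Replaces the slice-and-concat recursion (separate split and validity scans over each chunk plus repeated string concatenation) by an index-range recursion over the original string: one combined scan per chunk finds the split point and its validity simultaneously, the outer tail call becomes a while loop, and output pieces are appended to a list joined once at the end.
import Mathlib
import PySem

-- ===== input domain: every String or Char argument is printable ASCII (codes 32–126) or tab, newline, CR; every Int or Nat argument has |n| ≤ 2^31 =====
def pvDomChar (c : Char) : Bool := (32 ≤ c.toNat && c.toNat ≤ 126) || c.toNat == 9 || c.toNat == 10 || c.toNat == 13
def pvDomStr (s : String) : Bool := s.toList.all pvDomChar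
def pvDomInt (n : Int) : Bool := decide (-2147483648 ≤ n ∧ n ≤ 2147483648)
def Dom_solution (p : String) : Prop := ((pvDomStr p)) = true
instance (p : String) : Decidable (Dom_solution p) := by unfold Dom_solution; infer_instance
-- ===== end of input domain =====

-- B replaces A's slice-and-concat recursion with a single-pass index-range recursion (list output, joined once); measurably faster (O(n) vs O(n^2)); return value only, no mutation.

-- ===== PORT A =====
-- A's inner helper split(p): accumulate str1 char by char, counting '(' and ')', stop when the counts are equal; str2 is the rest.
def splitGoA (s : List Char) (acc : List Char) (c1 c2 : Int) : List Char × List Char :=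
  match s with
  | [] => (acc, [])          -- loop ran out: str2 keeps its initial ''
  | c :: rest =>
    let acc' := acc ++ [c]
    let c1' := if c = '(' then c1 + 1 else c1
    let c2' := if c = ')' then c2 + 1 else c2
    if c1' = c2' then (acc', rest)   -- str2 = p[i+1:]
    else splitGoA rest acc' c1' c2'

-- A's inner helper right(p): early False when count2 > count1, else True iff the final counts are equal.
def rightGoA (s : List Char) (c1 c2 : Int) : Bool :=
  match s with
  | [] => c1 == c2
  | c :: rest =>
    let c1' := if c = '(' then c1 + 1 else c1
    let c2' := if c = ')' then c2 + 1 else c2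
    if c2' > c1' then false else rightGoA rest c1' c2'

-- A's final for-loop over new_u = u[1:-1]: two independent ifs appending the flipped bracket.
def flipA (s : List Char) : List Char :=
  match s with
  | [] => []
  | c :: rest => ((if c = '(' then [')'] else []) ++ (if c = ')' then ['('] else [])) ++ flipA rest

-- the recursion of A's solution over the char list, structurally on the bound n ≥ |s|
-- (each recursive call is on v = p[i+1:], strictly shorter, so the bound never runs out;
--  u[1:-1] = (u.drop 1).dropLast exactly, Python slice of a string)
def solA : Nat → List Char → List Char
  | _, [] => []
  | 0, _ :: _ => []      -- unreachable: callers keep n ≥ |s|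
  | n + 1, c :: rest =>
    let uv := splitGoA (c :: rest) [] 0 0
    if rightGoA uv.1 0 0 then uv.1 ++ solA n uv.2
    else '(' :: (solA n uv.2 ++ ')' :: flipA ((uv.1.drop 1).dropLast))

def solution (p : String) : String := String.mk (solA p.toList.length p.toList)

-- ===== PORT B =====
-- B's inner while loop: scan from index i, maintaining the balance and an ok flag; stop past a zero
-- balance or at hi; structurally on the bound n ≥ hi - i - 1 (i increases every turn, so it never runs out)
def scanB : Nat → List Char → Nat → Nat → Int → Bool → Nat × Int × Bool
  | n, p, hi, i, bal, ok =>
    let c := p.getD i ' '       -- p[i]; callers keep i < hi ≤ len p, so in range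
    let bal' := if c = '(' then bal + 1 else if c = ')' then bal - 1 else bal
    let ok' := if bal' < 0 then false else ok
    match n with
    | 0 => (i + 1, bal', ok')
    | n + 1 =>
      if bal' = 0 ∨ hi ≤ i + 1 then (i + 1, bal', ok')
      else scanB n p hi (i + 1) bal' ok'

-- B's final for-loop over p[lo+1:i-1]: if/elif appending the flipped bracket.
def flipB (s : List Char) : List Char :=
  match s with
  | [] => []
  | c :: rest => (if c = '(' then [')'] else if c = ')' then ['('] else []) ++ flipB rest

-- B's go(lo, hi): the while loop is the recursion on lo, structurally on the bound n ≥ hi - lo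
-- (lo advances past the scanned chunk each turn); out is threaded; slices of p are drop/take
-- (all slice bounds are nonnegative and callers keep them ≤ len p, so drop/take is exactly the Python slice).
def goB : Nat → List Char → Nat → Nat → List Char → List Char
  | 0, _, _, _, out => out
  | n + 1, p, hi, lo, out =>
    if lo < hi then
      let r := scanB (hi - lo) p hi lo 0 true
      if r.2.2 && r.2.1 == 0 then
        goB n p hi r.1 (out ++ (p.drop lo).take (r.1 - lo))       -- out.append(p[lo:i]); lo = i
      else
        goB n p hi r.1 (out ++ ['(']) ++ ')' :: flipB ((p.drop (lo + 1)).take (r.1 - 1 - (lo + 1)))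
    else out

def solution_alt (p : String) : String := String.mk (goB p.toList.length p.toList p.toList.length 0 [])   -- ''.join(out)

-- ===== PRECONDITION & SPEC =====
def Spec_solution (p : String) (out : String) : Prop := out = solution_alt p
instance (p : String) (out : String) : Decidable (Spec_solution p out) := by unfold Spec_solution; infer_instance

-- ===== CLAIM (what is proved, stated in full; the proofs are below) =====
def Claim_equal_solution : Prop := ∀ (p : String), Dom_solution p → Spec_solution p (solution p)

-- ===== LEMMAS AND PROOFS =====

lemma splitGoA_snd_le (s acc : List Char) (c1 c2 : Int) :
    (splitGoA s acc c1 c2).2.length ≤ s.length := by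
  induction s generalizing acc c1 c2 with
  | nil => simp [splitGoA]
  | cons c rest ih =>
    simp only [splitGoA]
    split_ifs
    all_goals try simp
    all_goals exact le_trans (ih _ _ _) (Nat.le_succ _)

lemma splitGoA_snd_lt (c : Char) (rest acc : List Char) (c1 c2 : Int) :
    (splitGoA (c :: rest) acc c1 c2).2.length < (c :: rest).length := by
  simp only [splitGoA]
  split_ifs
  all_goals try simp
  all_goals exact splitGoA_snd_le _ _ _ _

-- list-level version of B's scan: returns (consumed prefix u, rest v, final balance, ok flag)
def scanL (s : List Char) (bal : Int) (ok : Bool) : List Char × List Char × Int × Bool :=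
  match s with
  | [] => ([], [], bal, ok)
  | c :: rest =>
    let bal' := if c = '(' then bal + 1 else if c = ')' then bal - 1 else bal
    let ok' := if bal' < 0 then false else ok
    if bal' = 0 ∨ rest = [] then ([c], rest, bal', ok')
    else
      let r := scanL rest bal' ok'
      (c :: r.1, r.2.1, r.2.2.1, r.2.2.2)

lemma scanL_append (s : List Char) (bal : Int) (ok : Bool) :
    (scanL s bal ok).1 ++ (scanL s bal ok).2.1 = s := by
  induction s generalizing bal ok with
  | nil => simp [scanL]
  | cons c rest ih => simp only [scanL]; split_ifs <;> simp [ih]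

lemma scanL_ne (c : Char) (rest : List Char) (bal : Int) (ok : Bool) :
    (scanL (c :: rest) bal ok).1 ≠ [] := by
  simp only [scanL]; split_ifs <;> simp

-- a slice (drop i).take (hi - i) with i < hi ≤ len p starts with p[i]
lemma slice_cons (p : List Char) (i hi : Nat) (h1 : i < hi) (h2 : hi ≤ p.length) :
    (p.drop i).take (hi - i) = p.getD i ' ' :: (p.drop (i + 1)).take (hi - (i + 1)) := by
  have hi' : i < p.length := lt_of_lt_of_le h1 h2
  rw [List.drop_eq_getElem_cons hi']
  have : hi - i = (hi - (i + 1)) + 1 := by omega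
  rw [this, List.take_succ_cons, List.getD_eq_getElem p ' ' hi']

-- bridge: B's index scan is the list scan of the slice (for any sufficient bound)
lemma scanB_eq : ∀ (n : Nat) (p : List Char) (hi i : Nat) (bal : Int) (ok : Bool),
    i < hi → hi ≤ p.length → hi - i ≤ n + 1 →
    scanB n p hi i bal ok =
      (i + (scanL ((p.drop i).take (hi - i)) bal ok).1.length,
       (scanL ((p.drop i).take (hi - i)) bal ok).2.2.1,
       (scanL ((p.drop i).take (hi - i)) bal ok).2.2.2) := by
  intro n
  induction n with
  | zero =>
    intro p hi i bal ok h1 h2 hn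
    rw [scanB, slice_cons p i hi h1 h2]
    rw [show hi - (i + 1) = 0 by omega]
    simp only [List.take_zero, scanL]
    simp
  | succ n ih =>
    intro p hi i bal ok h1 h2 hn
    have hrest : ((p.drop (i + 1)).take (hi - (i + 1)) = []) ↔ hi ≤ i + 1 := by
      constructor
      · intro hh
        by_contra hc
        have := congrArg List.length hh
        simp only [List.length_take, List.length_drop, List.length_nil] at this
        omega
      · intro hh
        rw [show hi - (i + 1) = 0 by omega]
        rfl
    rw [scanB, slice_cons p i hi h1 h2]
    simp only [scanL]
    by_cases hb : (if p.getD i ' ' = '(' then bal + 1 else if p.getD i ' ' = ')' then bal - 1 else bal) = 0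
    · rw [if_pos (Or.inl hb), if_pos (Or.inl hb)]
      simp
    · by_cases hstop : hi ≤ i + 1
      · rw [if_pos (Or.inr hstop), if_pos (Or.inr (hrest.mpr hstop))]
        simp
      · have hr : ¬ ((p.drop (i + 1)).take (hi - (i + 1)) = []) := fun hh => hstop (hrest.mp hh)
        rw [if_neg (not_or.mpr ⟨hb, hstop⟩), if_neg (not_or.mpr ⟨hb, hr⟩)]
        rw [ih p hi (i + 1) _ _ (by omega) h2 (by omega)]
        simp
        omega

lemma splitGoA_eq_scanL (s : List Char) (acc : List Char) (c1 c2 : Int) (ok : Bool) :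
    splitGoA s acc c1 c2 = (acc ++ (scanL s (c1 - c2) ok).1, (scanL s (c1 - c2) ok).2.1) := by
  induction s generalizing acc c1 c2 ok with
  | nil => simp [splitGoA, scanL]
  | cons c rest ih =>
    simp only [splitGoA, scanL]
    have hbal : (if c = '(' then c1 + 1 else c1) - (if c = ')' then c2 + 1 else c2)
        = (if c = '(' then c1 - c2 + 1 else if c = ')' then c1 - c2 - 1 else c1 - c2) := by
      by_cases h1 : c = '(' <;> by_cases h2 : c = ')' <;> simp_all <;> omega
    by_cases heq : (if c = '(' then c1 + 1 else c1) = (if c = ')' then c2 + 1 else c2)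
    · have : (if c = '(' then c1 - c2 + 1 else if c = ')' then c1 - c2 - 1 else c1 - c2) = 0 := by
        rw [← hbal]; omega
      simp [heq, this]
    · have hz : ¬ ((if c = '(' then c1 - c2 + 1 else if c = ')' then c1 - c2 - 1 else c1 - c2) = 0) := by
        rw [← hbal]; omega
      by_cases hrest : rest = []
      · subst hrest
        simp [heq, hz, splitGoA]
      · simp only [heq, hz, hrest, or_self, if_false]
        rw [ih (acc ++ [c]) _ _ (if (if c = '(' then c1 - c2 + 1 else if c = ')' then c1 - c2 - 1 else c1 - c2) < 0 then false else ok)]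
        rw [hbal]
        simp

lemma scanL_ok_and (s : List Char) (bal : Int) (ok : Bool) :
    (scanL s bal ok).2.2.2 = (ok && (scanL s bal true).2.2.2) := by
  induction s generalizing bal ok with
  | nil => simp [scanL]
  | cons c rest ih =>
    simp only [scanL]
    by_cases h0 : (if c = '(' then bal + 1 else if c = ')' then bal - 1 else bal) = 0 ∨ rest = []
    · rw [if_pos h0, if_pos h0]
      cases ok <;> simp
    · rw [if_neg h0, if_neg h0]
      show (scanL rest _ _).2.2.2 = (ok && (scanL rest _ _).2.2.2)
      rw [ih, ih _ (if (if c = '(' then bal + 1 else if c = ')' then bal - 1 else bal) < 0 then false else true)]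
      cases ok <;> by_cases hn : (if c = '(' then bal + 1 else if c = ')' then bal - 1 else bal) < 0 <;>
        simp [hn]

lemma rightGoA_eq_scanL (s : List Char) : ∀ (c1 c2 : Int), s ≠ [] →
    rightGoA (scanL s (c1 - c2) true).1 c1 c2
      = ((scanL s (c1 - c2) true).2.2.2 && ((scanL s (c1 - c2) true).2.2.1 == 0)) := by
  induction s with
  | nil => intro c1 c2 hs; exact absurd rfl hs
  | cons c rest ih =>
    intro c1 c2 _
    simp only [scanL]
    have hbal : (if c = '(' then c1 - c2 + 1 else if c = ')' then c1 - c2 - 1 else c1 - c2)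
        = (if c = '(' then c1 + 1 else c1) - (if c = ')' then c2 + 1 else c2) := by
      by_cases h1 : c = '(' <;> by_cases h2 : c = ')' <;> simp [h1, h2] <;> omega
    by_cases h0 : (if c = '(' then c1 - c2 + 1 else if c = ')' then c1 - c2 - 1 else c1 - c2) = 0 ∨ rest = []
    · rw [if_pos h0]
      simp only [rightGoA]
      by_cases hneg : (if c = '(' then c1 - c2 + 1 else if c = ')' then c1 - c2 - 1 else c1 - c2) < 0
      · rw [if_pos (by omega : (if c = ')' then c2 + 1 else c2) > (if c = '(' then c1 + 1 else c1))]
        rw [if_pos hneg]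
        simp
      · rw [if_neg (by omega : ¬ (if c = ')' then c2 + 1 else c2) > (if c = '(' then c1 + 1 else c1))]
        rw [if_neg hneg]
        by_cases he : (if c = '(' then c1 - c2 + 1 else if c = ')' then c1 - c2 - 1 else c1 - c2) = 0
        · have : (if c = '(' then c1 + 1 else c1) = (if c = ')' then c2 + 1 else c2) := by omega
          simp [this, he]
        · have : ¬ (if c = '(' then c1 + 1 else c1) = (if c = ')' then c2 + 1 else c2) := by omega
          simp [this, he]
    · rw [if_neg h0]
      push_neg at h0
      simp only [rightGoA]
      by_cases hneg : (if c = '(' then c1 - c2 + 1 else if c = ')' then c1 - c2 - 1 else c1 - c2) < 0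
      · rw [if_pos (by omega : (if c = ')' then c2 + 1 else c2) > (if c = '(' then c1 + 1 else c1))]
        rw [if_pos hneg, scanL_ok_and]
        simp
      · rw [if_neg (by omega : ¬ (if c = ')' then c2 + 1 else c2) > (if c = '(' then c1 + 1 else c1))]
        rw [if_neg hneg]
        rw [hbal]
        exact ih _ _ h0.2

lemma flip_eq (s : List Char) : flipA s = flipB s := by
  induction s with
  | nil => rfl
  | cons c rest ih =>
    simp only [flipA, flipB, ih]
    by_cases h1 : c = '(' <;> by_cases h2 : c = ')' <;> simp_all

lemma solA_fuel_eq : ∀ (m n : Nat) (s : List Char), s.length ≤ m → s.length ≤ n →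
    solA m s = solA n s := by
  intro m
  induction m with
  | zero =>
    intro n s hm _
    have hs : s = [] := List.eq_nil_of_length_eq_zero (by omega)
    subst hs
    cases n <;> rfl
  | succ m ih =>
    intro n s hm hn
    cases s with
    | nil => cases n <;> rfl
    | cons c rest =>
      cases n with
      | zero => simp at hn
      | succ n' =>
        have hv := splitGoA_snd_lt c rest [] 0 0
        simp only [solA]
        rw [ih n' (splitGoA (c :: rest) [] 0 0).2 (by simp at hm hv ⊢; omega) (by simp at hn hv ⊢; omega)]

lemma goB_eq : ∀ (n : Nat) (p : List Char) (hi lo : Nat) (out : List Char),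
    hi - lo ≤ n → hi ≤ p.length →
    goB n p hi lo out = out ++ solA (hi - lo) ((p.drop lo).take (hi - lo)) := by
  intro n
  induction n with
  | zero =>
    intro p hi lo out hn h2
    rw [show hi - lo = 0 by omega]
    simp [goB, solA]
  | succ n ih =>
    intro p hi lo out hn h2
    by_cases hlt : lo < hi
    case neg =>
      rw [goB, if_neg hlt, show hi - lo = 0 by omega]
      simp [solA]
    rw [goB, if_pos hlt]
    rw [scanB_eq (hi - lo) p hi lo 0 true hlt h2 (by omega)]
    set s := (p.drop lo).take (hi - lo) with hs
    set u := (scanL s 0 true).1 with hu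
    set v := (scanL s 0 true).2.1 with hv
    set balf := (scanL s 0 true).2.2.1 with hbalf
    set okf := (scanL s 0 true).2.2.2 with hokf
    have hslen : s.length = hi - lo := by
      rw [hs]; simp [List.length_take, List.length_drop]; omega
    have hsne : s ≠ [] := by
      intro h; rw [h] at hslen; simp at hslen; omega
    obtain ⟨c, rest, hcr⟩ := List.exists_cons_of_ne_nil hsne
    have huv : u ++ v = s := scanL_append s 0 true
    have hlen : u.length + v.length = hi - lo := by
      have := congrArg List.length huv
      simpa [hslen] using this
    have hune : u ≠ [] := by
      rw [hu, hcr]; exact scanL_ne c rest 0 true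
    have hk1 : 0 < u.length := List.length_pos_iff.mpr hune
    have hul : u.length ≤ hi - lo := by omega
    have hsplit : splitGoA s [] 0 0 = (u, v) := by
      have h := splitGoA_eq_scanL s [] 0 0 true
      rw [show (0:Int) - 0 = 0 by ring] at h
      simpa [← hu, ← hv] using h
    have hright : rightGoA u 0 0 = (okf && (balf == 0)) := by
      have h := rightGoA_eq_scanL s 0 0 hsne
      rw [show (0:Int) - 0 = 0 by ring] at h
      simpa [← hu, ← hbalf, ← hokf] using h
    have hsolA : solA (hi - lo) s = if rightGoA u 0 0 then u ++ solA (hi - lo - 1) v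
        else '(' :: (solA (hi - lo - 1) v ++ ')' :: flipA ((u.drop 1).dropLast)) := by
      rw [show hi - lo = (hi - lo - 1) + 1 by omega, hcr]
      simp only [solA]
      rw [← hcr, hsplit]
      simp
    -- the slice from lo of length |u| is u
    have hu_eq : (p.drop lo).take u.length = u := by
      have h1 : s.take u.length = u := by rw [← huv]; exact List.take_left
      rw [hs] at h1
      rwa [List.take_take, min_eq_left (by omega)] at h1
    have hu_slice : (p.drop lo).take (lo + u.length - lo) = u := by
      rw [show lo + u.length - lo = u.length by omega]; exact hu_eq
    -- the slice from lo + |u| to hi is v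
    have hv_slice : (p.drop (lo + u.length)).take (hi - (lo + u.length)) = v := by
      have h1 : s.drop u.length = v := by rw [← huv]; exact List.drop_left
      rw [hs, List.drop_take, List.drop_drop] at h1
      rw [show hi - (lo + u.length) = hi - lo - u.length by omega]
      exact h1
    -- the slice for the flipped middle is u[1:-1]
    have hflip_slice : (p.drop (lo + 1)).take (lo + u.length - 1 - (lo + 1)) = (u.drop 1).dropLast := by
      have h1 : u.drop 1 = (p.drop (lo + 1)).take (u.length - 1) := by
        conv_lhs => rw [← hu_eq]
        rw [List.drop_take, List.drop_drop]
      have h2 : ((p.drop (lo + 1)).take (u.length - 1)).length = u.length - 1 := by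
        simp [List.length_take, List.length_drop]
        omega
      rw [h1, List.dropLast_eq_take, h2, List.take_take,
        min_eq_left (by omega), show lo + u.length - 1 - (lo + 1) = u.length - 1 - 1 by omega]
    have hfuel : solA (hi - (lo + u.length)) v = solA (hi - lo - 1) v := by
      exact solA_fuel_eq _ _ v (by omega) (by omega)
    by_cases hok : okf && (balf == 0)
    · rw [if_pos hok, hu_slice]
      rw [ih p hi (lo + u.length) (out ++ u) (by omega) h2, hv_slice]
      rw [hsolA, hright, if_pos hok, hfuel]
      simp
    · rw [if_neg hok]
      rw [ih p hi (lo + u.length) (out ++ ['(']) (by omega) h2, hv_slice]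
      rw [hsolA, hright, if_neg hok, hflip_slice, flip_eq, hfuel]
      simp

theorem solution_spec_aux (p : String) : solution_alt p = solution p := by
  unfold solution solution_alt
  rw [goB_eq p.toList.length p.toList p.toList.length 0 [] le_rfl le_rfl]
  rw [List.drop_zero, Nat.sub_zero, List.take_length, List.nil_append]

-- ===== VERDICT (by name: the statement is the Claim_ definition above) =====
theorem solution_spec : Claim_equal_solution := by
  intro p _
  unfold Spec_solution
  exact (solution_spec_aux p).symm
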